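-- pv_equiv track=rewrite | github.com/efeipek05/PaperX | PaperX/PaperX_plots.py | _pick_ylabel
-- ===== SOURCE A (Python) =====
-- def _clean_label(s: str) -> str:
--     return (s or "").strip()
--
-- def _pick_ylabel(ylabels: list[str]) -> str:
--     """
--     2 eğride 'Y' yazmasın:
--     - Eğer tüm ylabels aynıysa => onu kullan
--     - Değilse => ilk dolu olanı kullan; yoksa 'Y'
--     """
--     cleaned = [_clean_label(x) for x in (ylabels or [])]
--     nonempty = [x for x in cleaned if x]
--     if not nonempty:
--         return "Y"
--     uniq = sorted(set(nonempty))
--     if len(uniq) == 1: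
--         return uniq[0]
--     # farklı etiketler varsa genel bir ylabel döndür
--     return nonempty[0]  # en azından saçma "Y" olmasın
-- ===== SOURCE B (Python) =====
-- def _pick_ylabel(ylabels: list[str]) -> str:
--     # Single pass: A's set/sort/uniqueness machinery is dead code —
--     # A always returns the first nonempty cleaned label (or 'Y').
--     for x in (ylabels or []):
--         c = (x or "").strip()
--         if c:
--             return c
--     return "Y"
-- ===== Notes on version B (the rewrite author's own statement) =====
-- stated objective: simpler
-- what changed: Replaced the build-three-lists + set + sort + length-check pipeline by a single early-return loop over the labels; the uniqueness branch is dead since A always returns the first nonempty cleaned label anyway.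
import Mathlib
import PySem

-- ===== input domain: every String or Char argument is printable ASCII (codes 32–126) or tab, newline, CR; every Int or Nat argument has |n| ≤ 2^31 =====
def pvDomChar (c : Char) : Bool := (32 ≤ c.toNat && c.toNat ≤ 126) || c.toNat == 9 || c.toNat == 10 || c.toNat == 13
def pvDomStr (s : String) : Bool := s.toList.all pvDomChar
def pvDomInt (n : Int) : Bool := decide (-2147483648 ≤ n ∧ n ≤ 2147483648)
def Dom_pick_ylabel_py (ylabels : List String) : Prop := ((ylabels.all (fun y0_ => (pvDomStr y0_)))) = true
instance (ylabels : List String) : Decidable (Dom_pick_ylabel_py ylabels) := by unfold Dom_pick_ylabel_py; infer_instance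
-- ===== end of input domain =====

-- B is the same selection written as one early-return pass; A's set/sort uniqueness branch is dead (objective: simpler).

-- ===== PORT A =====
-- _clean_label: (s or "").strip()
def clean_label_A (s : String) : String := PySem.Str.strip (if s = "" then "" else s)

def pick_ylabel_py (ylabels : List String) : String :=
  let cleaned := (if ylabels = [] then [] else ylabels).map clean_label_A
  let nonempty := cleaned.filter (fun x => x ≠ "")
  if nonempty = [] then "Y"
  else
    let uniq := PySem.List.sorted (PySem.Set.ofList nonempty) (fun x => x) false
    if uniq.length = 1 then (PySem.List.pyGet? uniq 0).getD ""   -- uniq[0]: in range since len = 1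
    else (PySem.List.pyGet? nonempty 0).getD ""                  -- nonempty[0]: in range since nonempty ≠ []

-- ===== PORT B =====
def pick_ylabel_py_alt_loop : List String → String
  | [] => "Y"
  | x :: rest =>
      let c := PySem.Str.strip (if x = "" then "" else x)
      if c ≠ "" then c else pick_ylabel_py_alt_loop rest

def pick_ylabel_py_alt (ylabels : List String) : String :=
  pick_ylabel_py_alt_loop (if ylabels = [] then [] else ylabels)

-- ===== PRECONDITION & SPEC =====
def Spec_pick_ylabel_py (ylabels : List String) (out : String) : Prop := out = pick_ylabel_py_alt ylabels
instance (ylabels : List String) (out : String) : Decidable (Spec_pick_ylabel_py ylabels out) := by unfold Spec_pick_ylabel_py; infer_instance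

-- ===== CLAIM (what is proved, stated in full; the proofs are below) =====
def Claim_equal_pick_ylabel_py : Prop := ∀ (ylabels : List String), Dom_pick_ylabel_py ylabels → Spec_pick_ylabel_py ylabels (pick_ylabel_py ylabels)

-- ===== LEMMAS AND PROOFS =====

-- B's loop returns the head of the nonempty cleaned labels, or "Y".
theorem alt_loop_eq_headD (ys : List String) :
    pick_ylabel_py_alt_loop ys = ((ys.map clean_label_A).filter (fun x => x ≠ "")).headD "Y" := by
  induction ys with
  | nil => rfl
  | cons x rest ih =>
      simp only [pick_ylabel_py_alt_loop, List.map_cons, List.filter_cons]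
      by_cases h : clean_label_A x = ""
      · simp [clean_label_A] at h ⊢
        simp [h, ih]
      · simp [clean_label_A] at h ⊢
        simp [h]

theorem A_body_eq_headD (N : List String) :
    (if N = [] then "Y"
     else if (PySem.List.sorted (PySem.Set.ofList N) (fun x => x) false).length = 1 then
       (PySem.List.pyGet? (PySem.List.sorted (PySem.Set.ofList N) (fun x => x) false) 0).getD ""
     else (PySem.List.pyGet? N 0).getD "") = N.headD "Y" := by
  cases N with
  | nil => rfl
  | cons n t =>
      simp only [List.cons_ne_nil, if_false, List.headD_cons]
      by_cases hlen : (PySem.List.sorted (PySem.Set.ofList (n :: t)) (fun x => x) false).length = 1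
      · simp only [hlen, if_true]
        obtain ⟨a, ha⟩ := List.length_eq_one_iff.mp hlen
        have hnmem : n ∈ PySem.Set.ofList (n :: t) := by
          rw [PySem.Set.mem_ofList]; simp
        have hmem : n ∈ PySem.List.sorted (PySem.Set.ofList (n :: t)) (fun x => x) false :=
          (PySem.List.sorted_perm _ _ _).mem_iff.mpr hnmem
        rw [ha] at hmem
        simp at hmem
        rw [ha, ← hmem]
        simp [PySem.List.pyGet?, PySem.List.pyIdx?]
      · simp only [hlen, if_false]
        simp [PySem.List.pyGet?, PySem.List.pyIdx?]

theorem pick_eq (ylabels : List String) :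
    pick_ylabel_py ylabels = pick_ylabel_py_alt ylabels := by
  unfold pick_ylabel_py pick_ylabel_py_alt
  rw [alt_loop_eq_headD]
  exact A_body_eq_headD _

-- ===== VERDICT (by name: the statement is the Claim_ definition above) =====
theorem pick_ylabel_py_spec : Claim_equal_pick_ylabel_py := by
  intro ylabels _
  unfold Spec_pick_ylabel_py
  exact pick_eq ylabels
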